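-- pv_equiv track=rewrite | github.com/miloskalicanin/gi_2019_project | Heuristics/good_suffix.py | __small_l_prime_array
-- ===== SOURCE A (Python) =====
-- def __small_l_prime_array(n):
--     """ Compile lp' array (Gusfield theorem 2.2.4) using N array. """
--     small_lp = [0] * len(n)
--     for i in range(len(n)):
--         if n[i] == i + 1:  # prefix matching a suffix
--             small_lp[len(n) - i - 1] = i + 1
--     for i in range(len(n) - 2, -1, -1):  # "smear" them out to the left
--         if small_lp[i] == 0:
--             small_lp[i] = small_lp[i + 1]
--     return small_lp
-- ===== SOURCE B (Python) =====
-- def __small_l_prime_array(n):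
--     """ Compile lp' array (Gusfield theorem 2.2.4) using N array. """
--     m = len(n)
--     out = []
--     carry = 0
--     for p in range(m - 1, -1, -1):
--         if n[m - 1 - p] == m - p:
--             carry = m - p
--         out.append(carry)
--     out.reverse()
--     return out
-- ===== Notes on version B (the rewrite author's own statement) =====
-- stated objective: simpler
-- what changed: Fuses A's two passes (seed where n[i]==i+1 on a preallocated array, then a second leftward smear pass with in-place updates) into a single right-to-left loop that threads the propagated value in a running carry and appends to a fresh list, with no index writes.
import Mathlib
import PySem

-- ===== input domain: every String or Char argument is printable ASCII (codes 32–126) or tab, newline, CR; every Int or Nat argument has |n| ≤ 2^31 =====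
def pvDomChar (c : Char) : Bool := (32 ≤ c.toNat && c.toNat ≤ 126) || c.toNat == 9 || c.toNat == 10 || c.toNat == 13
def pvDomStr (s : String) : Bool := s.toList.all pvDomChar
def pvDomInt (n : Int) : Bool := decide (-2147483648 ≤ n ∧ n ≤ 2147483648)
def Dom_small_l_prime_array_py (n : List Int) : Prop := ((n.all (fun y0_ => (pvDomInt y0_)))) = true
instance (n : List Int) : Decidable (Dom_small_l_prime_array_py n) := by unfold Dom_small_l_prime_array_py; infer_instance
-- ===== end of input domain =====

-- B fuses A's two passes (seed then leftward smear) into one right-to-left loop with a running carry; objective: simpler.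


-- ===== PORT A =====
def small_l_prime_array_py (n : List Int) : List Int :=
  let m : Int := n.length
  let s1 := (PySem.List.pyRange 0 m 1).foldl
    (fun s i => if PySem.List.pyGetD n i 0 = i + 1
                then PySem.List.pySetD s (m - i - 1) (i + 1) else s)
    (List.replicate n.length (0 : Int))
  (PySem.List.pyRange (m - 2) (-1) (-1)).foldl
    (fun s i => if PySem.List.pyGetD s i 0 = 0
                then PySem.List.pySetD s i (PySem.List.pyGetD s (i + 1) 0) else s)
    s1

-- ===== PORT B =====
def small_l_prime_array_py_alt (n : List Int) : List Int :=
  let m : Int := n.length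
  let st := (PySem.List.pyRange (m - 1) (-1) (-1)).foldl
    (fun (st : Int × List Int) p =>
      let carry := if PySem.List.pyGetD n (m - 1 - p) 0 = m - p then m - p else st.1
      (carry, st.2 ++ [carry]))
    ((0 : Int), ([] : List Int))
  st.2.reverse

-- ===== PRECONDITION & SPEC =====
def Spec_small_l_prime_array_py (n : List Int) (out : List Int) : Prop := out = small_l_prime_array_py_alt n
instance (n : List Int) (out : List Int) : Decidable (Spec_small_l_prime_array_py n out) := by unfold Spec_small_l_prime_array_py; infer_instance

-- ===== CLAIM (what is proved, stated in full; the proofs are below) =====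
def Claim_equal_small_l_prime_array_py : Prop := ∀ (n : List Int), Dom_small_l_prime_array_py n → Spec_small_l_prime_array_py n (small_l_prime_array_py n)

-- ===== LEMMAS AND PROOFS =====

-- seed value at index j (A's first pass), and the smeared value pvR n d = final value at index (length - d)
def pvSeed (n : List Int) (j : Nat) : Int :=
  if PySem.List.pyGetD n ((n.length : Int) - 1 - j) 0 = (n.length : Int) - j
  then (n.length : Int) - j else 0

def pvR (n : List Int) : Nat → Int
  | 0 => 0
  | d + 1 => if PySem.List.pyGetD n (d : Int) 0 = (d : Int) + 1 then ((d : Int) + 1) else pvR n d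

theorem pass1_aux (n : List Int) (k : Nat) (hk : k ≤ n.length) :
    (PySem.List.pyRange 0 (k : Int) 1).foldl
      (fun s i => if PySem.List.pyGetD n i 0 = i + 1
                  then PySem.List.pySetD s ((n.length : Int) - i - 1) (i + 1) else s)
      (List.replicate n.length (0 : Int))
    = (List.range n.length).map (fun j => if n.length - k ≤ j then pvSeed n j else 0) := by
  induction k with
  | zero =>
    rw [Nat.cast_zero, PySem.List.pyRange_one_eq_nil le_rfl, List.foldl_nil]
    apply List.ext_getElem
    · simp
    · intro j hj1 hj2
      have hjm : j < n.length := by simpa using hj1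
      simp only [List.getElem_replicate, List.getElem_map, List.getElem_range]
      rw [if_neg (by omega)]
  | succ k ih =>
    have hk' : k ≤ n.length := by omega
    have hcast : ((k + 1 : Nat) : Int) = ((k : Int)) + 1 := by push_cast ; ring
    rw [hcast, PySem.List.pyRange_one_succ_right (by omega), List.foldl_append, ih hk',
      List.foldl_cons, List.foldl_nil]
    by_cases hc : PySem.List.pyGetD n (k : Int) 0 = (k : Int) + 1
    · rw [if_pos hc]
      have hidx : ((n.length : Int) - (k : Int) - 1) = ((n.length - 1 - k : Nat) : Int) := by omega
      rw [hidx, PySem.List.pySetD_natCast]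
      apply List.ext_getElem
      · simp
      · intro j hj1 hj2
        have hjm : j < n.length := by simpa using hj2
        rw [List.getElem_set]
        simp only [List.getElem_map, List.getElem_range]
        by_cases hj : n.length - 1 - k = j
        · rw [if_pos hj]
          subst hj
          rw [if_pos (by omega)]
          unfold pvSeed
          have e1 : (n.length : Int) - 1 - ((n.length - 1 - k : Nat) : Int) = (k : Int) := by omega
          have e2 : (n.length : Int) - ((n.length - 1 - k : Nat) : Int) = (k : Int) + 1 := by omega
          rw [e1, e2, if_pos hc]
        · rw [if_neg hj]
          by_cases h5 : n.length - k ≤ j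
          · rw [if_pos (by omega), if_pos (by omega)]
          · rw [if_neg (by omega), if_neg (by omega)]
    · rw [if_neg hc]
      apply List.map_congr_left
      intro j hj
      have hjm : j < n.length := List.mem_range.mp hj
      by_cases h5 : n.length - k ≤ j
      · rw [if_pos (by omega), if_pos (by omega)]
      · by_cases h6 : n.length - (k + 1) ≤ j
        · rw [if_neg (by omega), if_pos h6]
          unfold pvSeed
          have e1 : (n.length : Int) - 1 - (j : Int) = (k : Int) := by omega
          have e2 : (n.length : Int) - (j : Int) = (k : Int) + 1 := by omega
          rw [e1, e2, if_neg hc]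
        · rw [if_neg (by omega), if_neg h6]

theorem pass2_aux (n : List Int) (hm : 1 ≤ n.length) (k : Nat) (hk : k ≤ n.length - 1) :
    (PySem.List.pyRange ((k : Int) - 1) (-1) (-1)).foldl
      (fun s i => if PySem.List.pyGetD s i 0 = 0
                  then PySem.List.pySetD s i (PySem.List.pyGetD s (i + 1) 0) else s)
      ((List.range n.length).map (fun j => if j < k then pvSeed n j else pvR n (n.length - j)))
    = (List.range n.length).map (fun j => pvR n (n.length - j)) := by
  induction k with
  | zero =>
    rw [Nat.cast_zero, PySem.List.pyRange_neg_one_eq_nil (by norm_num), List.foldl_nil]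
    apply List.map_congr_left
    intro j _
    rw [if_neg (Nat.not_lt_zero j)]
  | succ k ih =>
    have hklt : k + 1 < n.length := by omega
    have hcast : ((k + 1 : Nat) : Int) - 1 = (k : Int) := by push_cast ; ring
    rw [hcast, PySem.List.pyRange_neg_one_cons (by omega), List.foldl_cons]
    have hlen : ∀ (i : Nat), i < n.length →
        i < ((List.range n.length).map
          (fun j => if j < k + 1 then pvSeed n j else pvR n (n.length - j))).length := by
      intro i hi
      simpa using hi
    have g1 : PySem.List.pyGetD ((List.range n.length).map
        (fun j => if j < k + 1 then pvSeed n j else pvR n (n.length - j))) (k : Int) 0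
        = pvSeed n k := by
      rw [PySem.List.pyGetD_natCast, List.getD_eq_getElem _ _ (hlen k (by omega))]
      simp
    have g2 : PySem.List.pyGetD ((List.range n.length).map
        (fun j => if j < k + 1 then pvSeed n j else pvR n (n.length - j))) ((k : Int) + 1) 0
        = pvR n (n.length - (k + 1)) := by
      have : ((k : Int)) + 1 = ((k + 1 : Nat) : Int) := by push_cast ; ring
      rw [this, PySem.List.pyGetD_natCast, List.getD_eq_getElem _ _ (hlen (k + 1) hklt)]
      simp
    have hRstep : pvSeed n k = 0 → pvR n (n.length - k) = pvR n (n.length - (k + 1)) := by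
      intro hs
      have hd : n.length - k = (n.length - 1 - k) + 1 := by omega
      rw [hd, pvR]
      have e1 : ((n.length - 1 - k : Nat) : Int) = (n.length : Int) - 1 - (k : Int) := by omega
      have e2 : (n.length : Int) - 1 - (k : Int) + 1 = (n.length : Int) - (k : Int) := by omega
      rw [e1, e2]
      unfold pvSeed at hs
      by_cases hc : PySem.List.pyGetD n ((n.length : Int) - 1 - (k : Int)) 0 = (n.length : Int) - (k : Int)
      · rw [if_pos hc] at hs
        omega
      · rw [if_neg hc]
        congr 1
        omega
    have hSeedR : pvSeed n k ≠ 0 → pvSeed n k = pvR n (n.length - k) := by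
      intro hs
      have hd : n.length - k = (n.length - 1 - k) + 1 := by omega
      rw [hd, pvR]
      have e1 : ((n.length - 1 - k : Nat) : Int) = (n.length : Int) - 1 - (k : Int) := by omega
      have e2 : (n.length : Int) - 1 - (k : Int) + 1 = (n.length : Int) - (k : Int) := by omega
      rw [e1, e2]
      unfold pvSeed at hs ⊢
      by_cases hc : PySem.List.pyGetD n ((n.length : Int) - 1 - (k : Int)) 0 = (n.length : Int) - (k : Int)
      · rw [if_pos hc, if_pos hc]
      · rw [if_neg hc] at hs
        exact absurd rfl hs
    have hstep : (if PySem.List.pyGetD ((List.range n.length).map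
          (fun j => if j < k + 1 then pvSeed n j else pvR n (n.length - j))) (k : Int) 0 = 0
        then PySem.List.pySetD ((List.range n.length).map
          (fun j => if j < k + 1 then pvSeed n j else pvR n (n.length - j))) (k : Int)
          (PySem.List.pyGetD ((List.range n.length).map
            (fun j => if j < k + 1 then pvSeed n j else pvR n (n.length - j))) ((k : Int) + 1) 0)
        else ((List.range n.length).map
          (fun j => if j < k + 1 then pvSeed n j else pvR n (n.length - j))))
        = (List.range n.length).map (fun j => if j < k then pvSeed n j else pvR n (n.length - j)) := by
      rw [g1, g2]
      by_cases hs : pvSeed n k = 0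
      · rw [if_pos hs, PySem.List.pySetD_natCast]
        apply List.ext_getElem
        · simp
        · intro j hj1 hj2
          have hjm : j < n.length := by simpa using hj2
          rw [List.getElem_set]
          simp only [List.getElem_map, List.getElem_range]
          by_cases hj : k = j
          · subst hj
            rw [if_pos rfl, if_neg (lt_irrefl k)]
            exact (hRstep hs).symm
          · rw [if_neg hj]
            by_cases h5 : j < k
            · rw [if_pos (by omega), if_pos h5]
            · rw [if_neg (by omega), if_neg h5]
      · rw [if_neg hs]
        apply List.map_congr_left
        intro j hj
        have hjm : j < n.length := List.mem_range.mp hj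
        by_cases h5 : j < k
        · rw [if_pos (by omega), if_pos h5]
        · by_cases h6 : j < k + 1
          · have hjk : j = k := by omega
            subst hjk
            rw [if_pos h6, if_neg h5, hSeedR hs]
          · rw [if_neg h6, if_neg h5]
    rw [hstep, ih (by omega)]

theorem b_aux (n : List Int) (k : Nat) (hk : k ≤ n.length) (acc : List Int) :
    (PySem.List.pyRange ((k : Int) - 1) (-1) (-1)).foldl
      (fun (st : Int × List Int) p =>
        let carry := if PySem.List.pyGetD n ((n.length : Int) - 1 - p) 0 = (n.length : Int) - p
                     then (n.length : Int) - p else st.1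
        (carry, st.2 ++ [carry]))
      (pvR n (n.length - k), acc)
    = (pvR n n.length, acc ++ (List.range k).map (fun q => pvR n (n.length - k + q + 1))) := by
  induction k generalizing acc with
  | zero =>
    rw [PySem.List.pyRange_neg_one_eq_nil (by norm_num)]
    simp
  | succ k ih =>
    have h1 : ((k : Int) + 1) - 1 = (k : Int) := by ring
    have h2 : (-1 : Int) < (k : Int) := by omega
    push_cast
    rw [h1, PySem.List.pyRange_neg_one_cons h2, List.foldl_cons]
    have hcarry :
        (if PySem.List.pyGetD n ((n.length : Int) - 1 - (k : Int)) 0 = (n.length : Int) - (k : Int)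
         then (n.length : Int) - (k : Int) else pvR n (n.length - (k + 1)))
        = pvR n (n.length - k) := by
      have hd : n.length - k = (n.length - 1 - k) + 1 := by omega
      rw [hd]
      show _ = pvR n ((n.length - 1 - k) + 1)
      rw [pvR]
      have e1 : ((n.length - 1 - k : Nat) : Int) = (n.length : Int) - 1 - (k : Int) := by
        omega
      have e2 : (n.length : Int) - 1 - (k : Int) + 1 = (n.length : Int) - (k : Int) := by omega
      have e3 : n.length - 1 - k = n.length - (k + 1) := by omega
      rw [e1, e2, e3]
    simp only [hcarry]
    rw [ih (by omega) (acc ++ [pvR n (n.length - k)])]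
    congr 1
    rw [List.range_succ_eq_map, List.map_cons, List.map_map, List.append_assoc]
    congr 1
    have e0 : n.length - (k + 1) + 0 + 1 = n.length - k := by omega
    rw [e0, List.singleton_append]
    congr 1
    apply List.map_congr_left
    intro q hq
    simp only [Function.comp]
    congr 1
    omega

theorem a_eq_spec (n : List Int) :
    small_l_prime_array_py n = (List.range n.length).map (fun j => pvR n (n.length - j)) := by
  rcases Nat.eq_zero_or_pos n.length with h0 | h1
  · have hn : n = [] := List.length_eq_zero_iff.mp h0
    subst hn
    decide
  · show (PySem.List.pyRange ((n.length : Int) - 2) (-1) (-1)).foldl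
      (fun s i => if PySem.List.pyGetD s i 0 = 0
                  then PySem.List.pySetD s i (PySem.List.pyGetD s (i + 1) 0) else s)
      ((PySem.List.pyRange 0 (n.length : Int) 1).foldl
        (fun s i => if PySem.List.pyGetD n i 0 = i + 1
                    then PySem.List.pySetD s ((n.length : Int) - i - 1) (i + 1) else s)
        (List.replicate n.length (0 : Int)))
      = _
    rw [pass1_aux n n.length le_rfl]
    have hseed : (List.range n.length).map (fun j => if n.length - n.length ≤ j then pvSeed n j else 0)
        = (List.range n.length).map (fun j => if j < n.length - 1 then pvSeed n j else pvR n (n.length - j)) := by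
      apply List.map_congr_left
      intro j hj
      have hjm : j < n.length := List.mem_range.mp hj
      rw [if_pos (by omega)]
      by_cases h5 : j < n.length - 1
      · rw [if_pos h5]
      · have hj1 : j = n.length - 1 := by omega
        subst hj1
        rw [if_neg h5]
        have hd : n.length - (n.length - 1) = 1 := by omega
        rw [hd, pvR]
        unfold pvSeed
        have e1 : (n.length : Int) - 1 - ((n.length - 1 : Nat) : Int) = ((0 : Nat) : Int) := by omega
        have e2 : (n.length : Int) - ((n.length - 1 : Nat) : Int) = ((0 : Nat) : Int) + 1 := by omega
        rw [e1, e2]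
        rfl
    rw [hseed]
    have hcast2 : (n.length : Int) - 2 = ((n.length - 1 : Nat) : Int) - 1 := by omega
    rw [hcast2, pass2_aux n h1 (n.length - 1) le_rfl]

theorem b_eq_spec (n : List Int) :
    small_l_prime_array_py_alt n = (List.range n.length).map (fun j => pvR n (n.length - j)) := by
  have h := b_aux n n.length le_rfl []
  rw [Nat.sub_self] at h
  have h0 : pvR n 0 = 0 := rfl
  rw [h0] at h
  unfold small_l_prime_array_py_alt
  simp only [h, List.nil_append]
  apply List.ext_getElem
  · simp
  · intro i h1 h2
    simp only [List.getElem_reverse, List.getElem_map, List.getElem_range, List.length_map,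
      List.length_range] at *
    have h3 : i < n.length := by simpa using h2
    congr 1
    omega

-- ===== VERDICT (by name: the statement is the Claim_ definition above) =====
theorem small_l_prime_array_py_spec : Claim_equal_small_l_prime_array_py := by
  intro n _
  unfold Spec_small_l_prime_array_py
  rw [a_eq_spec, b_eq_spec]
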